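-- pv_equiv track=rewrite | github.com/aotoyae/problem-solving | python/programmers/level.1/prgm_118666_1.py | solution
-- ===== SOURCE A (Python) =====
-- def solution(survey, choices):
--     mbti = { 'R': 0, 'T': 0, 'C': 0, 'F': 0, 'J': 0, 'M': 0, 'A': 0, 'N': 0 }
--     category = ['RT', 'CF', 'JM', 'AN']
--     answer = ''
--
--     for i in range(len(survey)):
--         if choices[i] < 4: mbti[survey[i][0]] += 4 - choices[i]
--         else: mbti[survey[i][1]] += choices[i] - 4
--
--     for type in category:
--         if mbti[type[0]] > mbti[type[1]]: answer += type[0]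
--         elif mbti[type[0]] == mbti[type[1]]: answer += sorted(type)[0]
--         else: answer += type[1]
--
--     return answer
-- ===== SOURCE B (Python) =====
-- def solution(survey, choices):
--     # No tally structure at all: recompute each letter's total by direct summation,
--     # then pick each category's letter with min(key=(-score, letter)).
--     pairs = ('RT', 'CF', 'JM', 'AN')
--
--     def score(letter):
--         return sum(abs(c - 4)
--                    for s, c in zip(survey, choices)
--                    if (s[0] if c < 4 else s[1]) == letter)
--
--     return ''.join(min(pair, key=lambda l: (-score(l), l)) for pair in pairs)
-- ===== Notes on version B (the rewrite author's own statement) =====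
-- stated objective: alternative
-- what changed: B keeps no tally structure at all: instead of A's single pass that mutates eight dict counters and then compares pairs, B recomputes each letter's total on demand by a direct filtered summation over zip(survey,choices) and builds the answer with min(pair, key=(-score,letter)); Pre_ excludes inputs where A raises (choices shorter than survey, a missing character, or a letter outside RTCFJMAN).
-- outside the precondition, e.g. on solution(['XY'], [1]): A raises KeyError, B returns 'RCJA'; on solution(['RT'], []): A raises IndexError, B returns 'RCJA'
import Mathlib
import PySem

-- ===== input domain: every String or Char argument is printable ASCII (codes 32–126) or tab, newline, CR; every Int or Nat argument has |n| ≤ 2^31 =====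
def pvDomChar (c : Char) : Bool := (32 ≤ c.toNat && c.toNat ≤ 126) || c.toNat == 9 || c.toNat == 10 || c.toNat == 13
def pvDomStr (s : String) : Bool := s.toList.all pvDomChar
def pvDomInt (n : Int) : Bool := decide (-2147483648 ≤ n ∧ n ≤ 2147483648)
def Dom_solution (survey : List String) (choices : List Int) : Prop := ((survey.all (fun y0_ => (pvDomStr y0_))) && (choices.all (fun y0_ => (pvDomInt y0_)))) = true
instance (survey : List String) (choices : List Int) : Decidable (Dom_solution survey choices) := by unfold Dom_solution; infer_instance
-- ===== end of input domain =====

-- B keeps no tally structure: it recomputes each letter's total by direct filtered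
-- summation and picks each category's letter with min by key (-score, letter).

-- ===== PORT A =====
def solution (survey : List String) (choices : List Int) : String :=
  let mbti : PySem.Dict Char Int :=
    PySem.Dict.ofList [('R',0),('T',0),('C',0),('F',0),('J',0),('M',0),('A',0),('N',0)]
  let category : List String := ["RT", "CF", "JM", "AN"]
  let answer : String := ""
  -- for i in range(len(survey)):  (pyGetD defaults are unreachable under Pre_solution)
  let mbti := (PySem.List.pyRange 0 (survey.length : Int) 1).foldl (fun m i =>
      let c := PySem.List.pyGetD choices i 0
      let s := PySem.List.pyGetD survey i ""
      if c < 4 then m.modify ((PySem.Str.pyGet? s 0).getD ' ') 0 (· + (4 - c))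
      else m.modify ((PySem.Str.pyGet? s 1).getD ' ') 0 (· + (c - 4))) mbti
  let answer := category.foldl (fun ans ty =>
      let t0 := (PySem.Str.pyGet? ty 0).getD ' '
      let t1 := (PySem.Str.pyGet? ty 1).getD ' '
      if mbti.getD t0 0 > mbti.getD t1 0 then ans ++ String.ofList [t0]
      else if mbti.getD t0 0 = mbti.getD t1 0 then
        ans ++ String.ofList [((PySem.List.sorted ty.toList (fun x => x) false).headD ' ')]
      else ans ++ String.ofList [t1]) answer
  answer

-- ===== PORT B =====
-- score(letter): the filtered sum over zip(survey, choices)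
-- (the s[0]/s[1] accesses exist under Pre_solution; getD ' ' marks the IndexError case)
def pvScore (survey : List String) (choices : List Int) (letter : Char) : Int :=
  (survey.zip choices).foldl (fun acc sc =>
    if ((PySem.Str.pyGet? sc.1 (if sc.2 < 4 then 0 else 1)).getD ' ') = letter
    then acc + |sc.2 - 4| else acc) 0

-- Python tuple comparison (Int × Char), exact lexicographic <
def pvKeyLt (k1 k2 : Int × Char) : Bool := k1.1 < k2.1 || (k1.1 = k2.1 && k1.2 < k2.2)

-- Python min(iterable, key=…): first element with minimal key (nonempty literal iterables only)
def pvMinBy (key : Char → Int × Char) : List Char → Char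
  | [] => ' '   -- unreachable: B only calls it on two-letter literals
  | x :: xs => xs.foldl (fun best l => if pvKeyLt (key l) (key best) then l else best) x

def solution_alt (survey : List String) (choices : List Int) : String :=
  String.ofList (["RT", "CF", "JM", "AN"].map (fun pair =>
    pvMinBy (fun l => (-(pvScore survey choices l), l)) pair.toList))

-- ===== PRECONDITION & SPEC =====
def pvLetters : List Char := ['R','T','C','F','J','M','A','N']

def pvOkPair (s : String) (c : Int) : Bool :=
  match (if c < 4 then s.toList[0]? else s.toList[1]?) with
  | some ch => pvLetters.contains ch
  | none => false

-- Pre_ = exactly the inputs A returns on: choices covers survey, and for each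
-- answer the accessed character exists and is one of the eight MBTI letters
-- (otherwise A raises IndexError/KeyError).
def Pre_solution (survey : List String) (choices : List Int) : Prop :=
  survey.length ≤ choices.length ∧ ∀ p ∈ survey.zip choices, pvOkPair p.1 p.2 = true
instance (survey : List String) (choices : List Int) : Decidable (Pre_solution survey choices) := by
  unfold Pre_solution; infer_instance

def pvWitness_solution : List String × List Int := (["AN", "CF"], [1, 7])

def Spec_solution (survey : List String) (choices : List Int) (out : String) : Prop := out = solution_alt survey choices
instance (survey : List String) (choices : List Int) (out : String) : Decidable (Spec_solution survey choices out) := by unfold Spec_solution; infer_instance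

-- ===== CLAIM (what is proved, stated in full; the proofs are below) =====
def Claim_equal_solution : Prop := ∀ (survey : List String) (choices : List Int), Dom_solution survey choices → Pre_solution survey choices → Spec_solution survey choices (solution survey choices)

-- ===== LEMMAS AND PROOFS =====
def stepA (m : PySem.Dict Char Int) (s : String) (c : Int) : PySem.Dict Char Int :=
  if c < 4 then m.modify ((PySem.Str.pyGet? s 0).getD ' ') 0 (· + (4 - c))
  else m.modify ((PySem.Str.pyGet? s 1).getD ' ') 0 (· + (c - 4))

def pvFav (sc : String × Int) : Char :=
  (PySem.Str.pyGet? sc.1 (if sc.2 < 4 then 0 else 1)).getD ' '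

-- recursive form of B's score
def pvS (letter : Char) : List (String × Int) → Int
  | [] => 0
  | sc :: rest => (if pvFav sc = letter then |sc.2 - 4| else 0) + pvS letter rest

def dA (r t c f j m a n : Int) : PySem.Dict Char Int :=
  PySem.Dict.ofList [('R',r),('T',t),('C',c),('F',f),('J',j),('M',m),('A',a),('N',n)]

def readoutA (mbti : PySem.Dict Char Int) : String :=
  ["RT", "CF", "JM", "AN"].foldl (fun ans ty =>
      let t0 := (PySem.Str.pyGet? ty 0).getD ' '
      let t1 := (PySem.Str.pyGet? ty 1).getD ' '
      if mbti.getD t0 0 > mbti.getD t1 0 then ans ++ String.ofList [t0]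
      else if mbti.getD t0 0 = mbti.getD t1 0 then
        ans ++ String.ofList [((PySem.List.sorted ty.toList (fun x => x) false).headD ' ')]
      else ans ++ String.ofList [t1]) ""

lemma score_shift (letter : Char) (l : List (String × Int)) :
    ∀ a : Int, l.foldl (fun acc sc =>
      if ((PySem.Str.pyGet? sc.1 (if sc.2 < 4 then 0 else 1)).getD ' ') = letter
      then acc + |sc.2 - 4| else acc) a = a + pvS letter l := by
  induction l with
  | nil => intro a; simp [pvS]
  | cons p rest ih =>
    intro a
    simp only [List.foldl_cons, pvS, pvFav]
    split_ifs <;> rw [ih] <;> ring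

lemma score_eq (survey : List String) (choices : List Int) (letter : Char) :
    pvScore survey choices letter = pvS letter (survey.zip choices) := by
  have := score_shift letter (survey.zip choices) 0
  simpa [pvScore] using this

lemma foldA_zip (survey : List String) (choices : List Int) (h : survey.length ≤ choices.length) :
    ∀ (n a : Nat) (init : PySem.Dict Char Int), survey.length - a = n →
      (PySem.List.pyRange (a : Int) (survey.length : Int) 1).foldl (fun m i =>
          let c := PySem.List.pyGetD choices i 0
          let s := PySem.List.pyGetD survey i ""
          if c < 4 then m.modify ((PySem.Str.pyGet? s 0).getD ' ') 0 (· + (4 - c))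
          else m.modify ((PySem.Str.pyGet? s 1).getD ' ') 0 (· + (c - 4))) init
      = ((survey.drop a).zip (choices.drop a)).foldl (fun m p => stepA m p.1 p.2) init := by
  intro n
  induction n with
  | zero =>
    intro a init h0
    have ha : survey.length ≤ a := by omega
    rw [PySem.List.pyRange_one_eq_nil (by exact_mod_cast ha)]
    rw [List.drop_eq_nil_of_le ha]
    simp
  | succ k ih =>
    intro a init h0
    have ha : a < survey.length := by omega
    have hc : a < choices.length := lt_of_lt_of_le ha h
    rw [PySem.List.pyRange_one_cons (by exact_mod_cast ha)]
    rw [List.drop_eq_getElem_cons ha, List.drop_eq_getElem_cons hc]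
    rw [List.zip_cons_cons, List.foldl_cons, List.foldl_cons]
    have e1 : PySem.List.pyGetD survey ((a : Nat) : Int) "" = survey[a] := by
      simp [List.getD, List.getElem?_eq_getElem ha]
    have e2 : PySem.List.pyGetD choices ((a : Nat) : Int) 0 = choices[a] := by
      simp [List.getD, List.getElem?_eq_getElem hc]
    rw [show ((a : Nat) : Int) + 1 = (((a+1 : Nat)) : Int) by push_cast; ring]
    rw [ih (a+1) _ (by omega)]
    congr 1
    simp only [e1, e2, stepA]

lemma fav_letter (s : String) (c : Int) (hp : pvOkPair s c = true) :
    pvFav (s, c) = 'R' ∨ pvFav (s, c) = 'T' ∨ pvFav (s, c) = 'C' ∨ pvFav (s, c) = 'F' ∨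
    pvFav (s, c) = 'J' ∨ pvFav (s, c) = 'M' ∨ pvFav (s, c) = 'A' ∨ pvFav (s, c) = 'N' := by
  unfold pvOkPair at hp
  unfold pvFav
  by_cases h4 : c < 4
  · simp only [if_pos h4] at hp ⊢
    cases e : s.toList[0]? with
    | none => rw [e] at hp; simp at hp
    | some l =>
      rw [e] at hp
      have hg : (PySem.Str.pyGet? s 0).getD ' ' = l := by
        simp [PySem.List.pyGet?_zero, e]
      rw [hg]
      simpa [pvLetters] using hp
  · simp only [if_neg h4] at hp ⊢
    cases e : s.toList[1]? with
    | none => rw [e] at hp; simp at hp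
    | some l =>
      rw [e] at hp
      have h1 : 1 < s.length := by
        have := List.getElem?_eq_some_iff.mp e
        simpa using this.1
      have hg : (PySem.Str.pyGet? s 1).getD ' ' = l := by
        have := List.getElem?_eq_some_iff.mp e
        simp [PySem.List.pyGet?, PySem.List.pyIdx?, h1, this.2]
      rw [hg]
      simpa [pvLetters] using hp

lemma stepA_fav (m : PySem.Dict Char Int) (s : String) (c : Int) :
    stepA m s c = m.modify (pvFav (s, c)) 0 (· + |c - 4|) := by
  unfold stepA pvFav
  by_cases h4 : c < 4
  · simp only [if_pos h4]
    congr 1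
    funext x
    have : |c - 4| = 4 - c := by rw [abs_of_nonpos (by omega)]; ring
    rw [this]
  · simp only [if_neg h4]
    congr 1
    funext x
    have : |c - 4| = c - 4 := abs_of_nonneg (by omega)
    rw [this]

lemma modify_dA (r t c f j m a n w : Int) :
    ((dA r t c f j m a n).modify 'R' 0 (· + w) = dA (r+w) t c f j m a n) ∧
    ((dA r t c f j m a n).modify 'T' 0 (· + w) = dA r (t+w) c f j m a n) ∧
    ((dA r t c f j m a n).modify 'C' 0 (· + w) = dA r t (c+w) f j m a n) ∧
    ((dA r t c f j m a n).modify 'F' 0 (· + w) = dA r t c (f+w) j m a n) ∧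
    ((dA r t c f j m a n).modify 'J' 0 (· + w) = dA r t c f (j+w) m a n) ∧
    ((dA r t c f j m a n).modify 'M' 0 (· + w) = dA r t c f j (m+w) a n) ∧
    ((dA r t c f j m a n).modify 'A' 0 (· + w) = dA r t c f j m (a+w) n) ∧
    ((dA r t c f j m a n).modify 'N' 0 (· + w) = dA r t c f j m a (n+w)) := by
  refine ⟨?_, ?_, ?_, ?_, ?_, ?_, ?_, ?_⟩ <;>
    simp [dA, PySem.Dict.modify, PySem.Dict.ofList, PySem.Dict.update, PySem.Dict.insert,
      PySem.Dict.getD, PySem.Dict.get?, PySem.Dict.empty, PySem.Dict.contains]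

lemma foldA_eval (l : List (String × Int)) :
    (∀ p ∈ l, pvOkPair p.1 p.2 = true) →
    ∀ r t c f j m a n : Int,
      l.foldl (fun m p => stepA m p.1 p.2) (dA r t c f j m a n)
        = dA (r + pvS 'R' l) (t + pvS 'T' l) (c + pvS 'C' l) (f + pvS 'F' l)
             (j + pvS 'J' l) (m + pvS 'M' l) (a + pvS 'A' l) (n + pvS 'N' l) := by
  induction l with
  | nil => intro _ r t c f j m a n; simp [pvS]
  | cons p rest ih =>
    intro hok r t c f j m a n
    have hok' : ∀ q ∈ rest, pvOkPair q.1 q.2 = true :=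
      fun q hq => hok q (List.mem_cons_of_mem _ hq)
    have hfavs := fav_letter p.1 p.2 (by simpa using hok p List.mem_cons_self)
    have hfp : pvFav (p.1, p.2) = pvFav p := by cases p; rfl
    rw [hfp] at hfavs
    simp only [List.foldl_cons]
    rw [stepA_fav, hfp]
    obtain ⟨mR, mT, mC, mF, mJ, mM, mA, mN⟩ := modify_dA r t c f j m a n |p.2 - 4|
    rcases hfavs with hf|hf|hf|hf|hf|hf|hf|hf
    · rw [hf, mR, ih hok']
      simp only [pvS, hf]
      simp [add_assoc]
    · rw [hf, mT, ih hok']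
      simp only [pvS, hf]
      simp [add_assoc]
    · rw [hf, mC, ih hok']
      simp only [pvS, hf]
      simp [add_assoc]
    · rw [hf, mF, ih hok']
      simp only [pvS, hf]
      simp [add_assoc]
    · rw [hf, mJ, ih hok']
      simp only [pvS, hf]
      simp [add_assoc]
    · rw [hf, mM, ih hok']
      simp only [pvS, hf]
      simp [add_assoc]
    · rw [hf, mA, ih hok']
      simp only [pvS, hf]
      simp [add_assoc]
    · rw [hf, mN, ih hok']
      simp only [pvS, hf]
      simp [add_assoc]

lemma pick_eq (x y : Int) (c0 c1 : Char) (hne : ¬ c1 < c0) :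
    (if x > y then String.ofList [c0] else if x = y then String.ofList [c0] else String.ofList [c1])
      = String.ofList [if pvKeyLt (-y, c1) (-x, c0) then c1 else c0] := by
  rcases lt_trichotomy x y with h|h|h
  · rw [if_neg (by omega), if_neg (by omega)]
    have hk : pvKeyLt (-y, c1) (-x, c0) = true := by
      simp only [pvKeyLt]
      have h1 : (-y : Int) < -x := by omega
      simp [h1]
    rw [if_pos hk]
  · rw [if_neg (by omega), if_pos h]
    have hk : pvKeyLt (-y, c1) (-x, c0) = false := by
      simp only [pvKeyLt]
      have h1 : ¬ (-y : Int) < -x := by omega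
      simp [h1, hne]
    simp [hk]
  · rw [if_pos h]
    have hk : pvKeyLt (-y, c1) (-x, c0) = false := by
      simp only [pvKeyLt]
      have h1 : ¬ (-y : Int) < -x := by omega
      have h2 : ¬ (-y : Int) = -x := by omega
      simp [h1, h2]
    simp [hk]

-- the only-used fact about the second fold: per-category append then pick
lemma ite_append (p : Prop) [Decidable p] (a x y : String) :
    (if p then a ++ x else a ++ y) = a ++ if p then x else y := by split_ifs <;> rfl

lemma getD_dA (r t c f j m a n : Int) :
    (dA r t c f j m a n).getD 'R' 0 = r ∧ (dA r t c f j m a n).getD 'T' 0 = t ∧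
    (dA r t c f j m a n).getD 'C' 0 = c ∧ (dA r t c f j m a n).getD 'F' 0 = f ∧
    (dA r t c f j m a n).getD 'J' 0 = j ∧ (dA r t c f j m a n).getD 'M' 0 = m ∧
    (dA r t c f j m a n).getD 'A' 0 = a ∧ (dA r t c f j m a n).getD 'N' 0 = n := by
  refine ⟨?_, ?_, ?_, ?_, ?_, ?_, ?_, ?_⟩ <;>
    simp [dA, PySem.Dict.getD, PySem.Dict.get?, PySem.Dict.ofList, PySem.Dict.update,
      PySem.Dict.insert, PySem.Dict.empty, PySem.Dict.contains]

lemma readout_eq (g : Char → Int) :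
    readoutA (dA (g 'R') (g 'T') (g 'C') (g 'F') (g 'J') (g 'M') (g 'A') (g 'N'))
      = String.ofList (["RT", "CF", "JM", "AN"].map (fun pair =>
          pvMinBy (fun l => (-(g l), l)) pair.toList)) := by
  obtain ⟨gR, gT, gC, gF, gJ, gM, gA, gN⟩ := getD_dA (g 'R') (g 'T') (g 'C') (g 'F') (g 'J') (g 'M') (g 'A') (g 'N')
  have p1 : (PySem.Str.pyGet? "RT" 0).getD ' ' = 'R' := by decide
  have p2 : (PySem.Str.pyGet? "RT" 1).getD ' ' = 'T' := by decide
  have p3 : (PySem.Str.pyGet? "CF" 0).getD ' ' = 'C' := by decide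
  have p4 : (PySem.Str.pyGet? "CF" 1).getD ' ' = 'F' := by decide
  have p5 : (PySem.Str.pyGet? "JM" 0).getD ' ' = 'J' := by decide
  have p6 : (PySem.Str.pyGet? "JM" 1).getD ' ' = 'M' := by decide
  have p7 : (PySem.Str.pyGet? "AN" 0).getD ' ' = 'A' := by decide
  have p8 : (PySem.Str.pyGet? "AN" 1).getD ' ' = 'N' := by decide
  have s1 : (PySem.List.sorted ['R','T'] (fun x => x) false).headD ' ' = 'R' := by decide
  have s2 : (PySem.List.sorted ['C','F'] (fun x => x) false).headD ' ' = 'C' := by decide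
  have s3 : (PySem.List.sorted ['J','M'] (fun x => x) false).headD ' ' = 'J' := by decide
  have s4 : (PySem.List.sorted ['A','N'] (fun x => x) false).headD ' ' = 'A' := by decide
  have m1 : ("RT".toList) = ['R','T'] := by decide
  have m2 : ("CF".toList) = ['C','F'] := by decide
  have m3 : ("JM".toList) = ['J','M'] := by decide
  have m4 : ("AN".toList) = ['A','N'] := by decide
  simp only [readoutA, List.foldl_cons, List.foldl_nil, List.map,
    p1, p2, p3, p4, p5, p6, p7, p8, s1, s2, s3, s4, m1, m2, m3, m4,
    gR, gT, gC, gF, gJ, gM, gA, gN, ite_append, pvMinBy]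
  rw [pick_eq (g 'R') (g 'T') 'R' 'T' (by decide),
      pick_eq (g 'C') (g 'F') 'C' 'F' (by decide),
      pick_eq (g 'J') (g 'M') 'J' 'M' (by decide),
      pick_eq (g 'A') (g 'N') 'A' 'N' (by decide)]
  simp [← String.ofList_append]

theorem main_thm (survey : List String) (choices : List Int)
    (hpre : Pre_solution survey choices) :
    solution survey choices = solution_alt survey choices := by
  obtain ⟨hlen, hok⟩ := hpre
  have h0 := foldA_zip survey choices hlen survey.length 0 (dA 0 0 0 0 0 0 0 0) (by omega)
  simp only [Nat.cast_zero, List.drop_zero] at h0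
  have heval := foldA_eval (survey.zip choices) hok 0 0 0 0 0 0 0 0
  simp only [zero_add] at heval
  have hA : solution survey choices
      = readoutA ((PySem.List.pyRange 0 (survey.length : Int) 1).foldl (fun m i =>
          let c := PySem.List.pyGetD choices i 0
          let s := PySem.List.pyGetD survey i ""
          if c < 4 then m.modify ((PySem.Str.pyGet? s 0).getD ' ') 0 (· + (4 - c))
          else m.modify ((PySem.Str.pyGet? s 1).getD ' ') 0 (· + (c - 4))) (dA 0 0 0 0 0 0 0 0)) := rfl
  rw [hA, h0, heval]
  have hB : solution_alt survey choices
      = String.ofList (["RT", "CF", "JM", "AN"].map (fun pair =>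
          pvMinBy (fun l => (-(pvScore survey choices l), l)) pair.toList)) := rfl
  rw [hB]
  have := readout_eq (fun l => pvS l (survey.zip choices))
  simp only [score_eq]
  exact this

-- ===== VERDICT (by name: the statement is the Claim_ definition above) =====
theorem solution_spec : Claim_equal_solution := by
  intro survey choices _ hpre
  exact main_thm survey choices hpre
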